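-- pv_equiv track=rewrite | github.com/nicholasgeorgeson-prog/AEGIS | aegis_manager.py | _should_preserve
-- ===== SOURCE A (Python) =====
-- USER_DATA_PRESERVE = {
--     'scan_history.db',
--     'config.json',
--     'user_settings.json',
--     'review_patterns.json',
--     'roles_patterns.json',
--     'statement_forge/statement_patterns.json',
--     'hyperlink_validator/hv_patterns.json',
--     'proposal_compare/parser_patterns.json',
--     'hyperlink_exclusions.db',
-- }
--
-- PRESERVE_DIRS = {
--     'wheels', 'packaging/wheels', 'temp', 'backups', 'updates', 'logs',
--     'static/audio', 'static/img', 'static/images', 'test_docs',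
--     'test_documents', '__pycache__', '.git', 'docling_models',
--     'nltk_data', 'nlp_offline', 'learner_data', 'custom_dictionaries',
--     'node_modules', '.venv', 'venv',
-- }
--
-- def _should_preserve(rel_path):
--     """Check if a file should be preserved (user data)."""
--     norm = rel_path.replace('\\', '/')
--     # Check exact matches
--     if norm in USER_DATA_PRESERVE:
--         return True
--     # Check directory prefixes
--     for pdir in PRESERVE_DIRS:
--         if norm.startswith(pdir + '/') or norm == pdir:
--             return True
--     return False
-- ===== SOURCE B (Python) =====
-- # Same preserve data, stored as whitespace-separated tables (no entry contains a space).
-- _USER_DATA = frozenset("""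
-- scan_history.db config.json user_settings.json review_patterns.json
-- roles_patterns.json statement_forge/statement_patterns.json
-- hyperlink_validator/hv_patterns.json proposal_compare/parser_patterns.json
-- hyperlink_exclusions.db
-- """.split())
--
-- _PRESERVE = frozenset("""
-- wheels packaging/wheels temp backups updates logs static/audio static/img
-- static/images test_docs test_documents __pycache__ .git docling_models
-- nltk_data nlp_offline learner_data custom_dictionaries node_modules .venv venv
-- """.split())
--
--
-- def _should_preserve(rel_path):
--     """Check if a file should be preserved (user data)."""
--     norm = rel_path.replace('\\', '/')
--     if norm in _USER_DATA:
--         return True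
--     # Scan the path once: every '/' boundary yields a candidate directory prefix,
--     # and finally the whole path itself is a candidate.
--     for i, ch in enumerate(norm):
--         if ch == '/' and norm[:i] in _PRESERVE:
--             return True
--     return norm in _PRESERVE
-- ===== Notes on version B (the rewrite author's own statement) =====
-- stated objective: alternative
-- what changed: Instead of iterating the fixed PRESERVE_DIRS set and prefix-testing each entry against the path, B scans the path's characters once and tests each slash-boundary prefix (and finally the whole path) for membership in the set, whose entries are stored as a whitespace-split table.
import Mathlib
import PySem

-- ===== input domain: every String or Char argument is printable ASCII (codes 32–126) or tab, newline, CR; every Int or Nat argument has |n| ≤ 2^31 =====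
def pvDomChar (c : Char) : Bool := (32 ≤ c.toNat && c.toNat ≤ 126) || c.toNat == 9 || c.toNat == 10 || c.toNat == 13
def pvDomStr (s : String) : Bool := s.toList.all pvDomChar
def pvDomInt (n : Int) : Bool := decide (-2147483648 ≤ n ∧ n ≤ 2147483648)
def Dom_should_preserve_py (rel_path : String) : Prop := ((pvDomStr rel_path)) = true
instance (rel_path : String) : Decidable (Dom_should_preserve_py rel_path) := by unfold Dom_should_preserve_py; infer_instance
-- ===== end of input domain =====

-- B replaces A's scan over the fixed PRESERVE_DIRS set (prefix-testing each entry against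
-- the path) by a single scan over the path's characters, testing each slash-boundary prefix
-- (and finally the whole path) for set membership; objective: alternative (same result,
-- different traversal; the tables are stored as whitespace-split strings in B).

-- ===== PORT A =====
def pvUserData : List (List Char) :=
  ["scan_history.db".toList, "config.json".toList, "user_settings.json".toList,
   "review_patterns.json".toList, "roles_patterns.json".toList,
   "statement_forge/statement_patterns.json".toList,
   "hyperlink_validator/hv_patterns.json".toList,
   "proposal_compare/parser_patterns.json".toList, "hyperlink_exclusions.db".toList]

def pvPreserveDirs : List (List Char) :=
  ["wheels".toList, "packaging/wheels".toList, "temp".toList, "backups".toList,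
   "updates".toList, "logs".toList, "static/audio".toList, "static/img".toList,
   "static/images".toList, "test_docs".toList, "test_documents".toList,
   "__pycache__".toList, ".git".toList, "docling_models".toList, "nltk_data".toList,
   "nlp_offline".toList, "learner_data".toList, "custom_dictionaries".toList,
   "node_modules".toList, ".venv".toList, "venv".toList]

def should_preserve_py (rel_path : String) : Bool :=
  let norm := PySem.Chars.replace rel_path.toList "\\".toList "/".toList
  if pvUserData.contains norm then true
  else pvPreserveDirs.any (fun pdir =>
    PySem.Chars.startswith norm (pdir ++ "/".toList) || norm == pdir)

-- ===== PORT B =====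
-- B's tables: whitespace-separated strings split with str.split() (Python's .split()
-- with no argument → PySem.Chars.split₀), as in Source B.
def pvUserDataB : List (List Char) :=
  PySem.Chars.split₀ ("\nscan_history.db config.json user_settings.json review_patterns.json\nroles_patterns.json statement_forge/statement_patterns.json\nhyperlink_validator/hv_patterns.json proposal_compare/parser_patterns.json\nhyperlink_exclusions.db\n".toList)

def pvPreserveB : List (List Char) :=
  PySem.Chars.split₀ ("\nwheels packaging/wheels temp backups updates logs static/audio static/img\nstatic/images test_docs test_documents __pycache__ .git docling_models\nnltk_data nlp_offline learner_data custom_dictionaries node_modules .venv venv\n".toList)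

def should_preserve_py_alt (rel_path : String) : Bool :=
  let norm := PySem.Chars.replace rel_path.toList "\\".toList "/".toList
  if pvUserDataB.contains norm then true
  else if (PySem.List.enumerate norm).any (fun p =>
      p.2 == '/' && pvPreserveB.contains (PySem.List.slice norm none (some p.1))) then
    true
  else pvPreserveB.contains norm

-- ===== PRECONDITION & SPEC =====
def Spec_should_preserve_py (rel_path : String) (out : Bool) : Prop := out = should_preserve_py_alt rel_path
instance (rel_path : String) (out : Bool) : Decidable (Spec_should_preserve_py rel_path out) := by unfold Spec_should_preserve_py; infer_instance

-- ===== CLAIM (what is proved, stated in full; the proofs are below) =====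
def Claim_equal_should_preserve_py : Prop := ∀ (rel_path : String), Dom_should_preserve_py rel_path → Spec_should_preserve_py rel_path (should_preserve_py rel_path)

-- ===== LEMMAS AND PROOFS =====

-- B's whitespace-split tables hold exactly A's entries.
set_option maxRecDepth 100000 in
theorem pv_userData_eq : pvUserDataB = pvUserData := by decide
set_option maxRecDepth 100000 in
theorem pv_preserve_eq : pvPreserveB = pvPreserveDirs := by decide

-- A '/'-terminated prefix of cs is exactly a cut at some index k with cs[k] = '/'.
theorem pv_prefix_snoc_iff (p cs : List Char) :
    p ++ ['/'] <+: cs ↔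
      ∃ k : Nat, k < cs.length ∧ cs.take k = p ∧ cs[k]? = some '/' := by
  constructor
  · rintro ⟨t, ht⟩
    refine ⟨p.length, ?_, ?_, ?_⟩ <;> subst ht <;>
      simp
  · rintro ⟨k, hk, hp, hc⟩
    refine ⟨cs.drop (k + 1), ?_⟩
    have h1 : cs.take (k + 1) = p ++ ['/'] := by
      rw [List.take_add_one, hp, hc]; rfl
    calc (p ++ ['/']) ++ cs.drop (k + 1) = cs.take (k + 1) ++ cs.drop (k + 1) := by rw [h1]
      _ = cs := List.take_append_drop _ _

-- Core: scanning the fixed dir set with startswith/== equals scanning the path's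
-- '/'-boundaries (plus the full path) with set membership.
theorem pv_scan_eq (S : List (List Char)) (cs : List Char) :
    (S.any (fun pdir => PySem.Chars.startswith cs (pdir ++ ['/']) || cs == pdir))
      = ((PySem.List.enumerate cs).any (fun p =>
            p.2 == '/' && S.contains (cs.take p.1.toNat)) || S.contains cs) := by
  rw [Bool.eq_iff_iff]
  simp only [List.any_eq_true, Bool.or_eq_true, Bool.and_eq_true, beq_iff_eq,
    PySem.Chars.startswith_iff, List.contains_eq_mem, decide_eq_true_eq,
    PySem.List.mem_enumerate_iff]
  constructor
  · rintro ⟨pdir, hmem, hpre | heq⟩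
    · rcases (pv_prefix_snoc_iff pdir cs).mp hpre with ⟨k, hk, htake, hget⟩
      obtain ⟨hk', hck⟩ := List.getElem?_eq_some_iff.mp hget
      refine Or.inl ⟨(↑k, '/'), ⟨k, hk, by simp [hck]⟩, rfl, ?_⟩
      simpa [htake] using hmem
    · exact Or.inr (heq ▸ hmem)
  · rintro (⟨⟨i, c⟩, ⟨k, hk, hpk⟩, hc, hmem⟩ | hmem)
    · rw [Prod.mk.injEq] at hpk
      obtain ⟨hi, hck⟩ := hpk
      simp only at hc hmem
      refine ⟨cs.take k, by simpa [hi] using hmem, Or.inl ?_⟩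
      refine (pv_prefix_snoc_iff _ cs).mpr ⟨k, hk, rfl, ?_⟩
      rw [List.getElem?_eq_getElem hk, ← hck, hc]
    · exact ⟨cs, hmem, Or.inr rfl⟩

theorem pv_any_congr {α : Type} (l : List α) (p q : α → Bool)
    (h : ∀ a ∈ l, p a = q a) : l.any p = l.any q := by
  induction l with
  | nil => rfl
  | cons x xs ih =>
      simp only [List.any_cons, h x (List.mem_cons_self ..),
        ih (fun a ha => h a (List.mem_cons_of_mem _ ha))]

-- The two else-branches agree for every normalised path.
theorem pv_body_eq (norm : List Char) :
    (pvPreserveDirs.any (fun pdir =>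
        PySem.Chars.startswith norm (pdir ++ "/".toList) || norm == pdir))
      = (if (PySem.List.enumerate norm).any (fun p =>
            p.2 == '/' && pvPreserveB.contains (PySem.List.slice norm none (some p.1)))
         then true else pvPreserveB.contains norm) := by
  have hsl : ∀ p ∈ PySem.List.enumerate norm,
      (p.2 == '/' && pvPreserveB.contains (PySem.List.slice norm none (some p.1)))
        = (p.2 == '/' && pvPreserveDirs.contains (norm.take p.1.toNat)) := by
    rintro ⟨i, c⟩ hp
    rcases (PySem.List.mem_enumerate_iff ..).mp hp with ⟨k, hk, hpk⟩
    cases hpk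
    simp [PySem.List.slice_to, pv_preserve_eq]
  rw [pv_any_congr _ _ _ hsl, show ("/".toList : List Char) = ['/'] from rfl,
    pv_scan_eq pvPreserveDirs norm, pv_preserve_eq]
  cases h : (PySem.List.enumerate norm).any (fun p =>
      p.2 == '/' && pvPreserveDirs.contains (norm.take p.1.toNat)) <;> simp [h]

-- ===== VERDICT (by name: the statement is the Claim_ definition above) =====
theorem should_preserve_py_spec : Claim_equal_should_preserve_py := by
  intro rel_path _
  unfold Spec_should_preserve_py should_preserve_py should_preserve_py_alt
  simp only [pv_userData_eq, pv_body_eq]
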